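-- pv_equiv track=rewrite | github.com/tyutltf/Leecode | 501-600/504-七进制数.py | convertToBase7
-- ===== SOURCE A (Python) =====
-- def convertToBase7(num: int):
--     base7 = []
--     if num < 0:
--         flag = 1
--         num = -num
--     else:
--         flag = 0
--     while num >= 7:
--         fig = str(num % 7)
--         base7.append(fig)
--         num = num // 7
--     base7.append(str(num))
--     if flag:
--         base7.append('-')
--     base7.reverse()
--     return ''.join(base7)
-- ===== SOURCE B (Python) =====
-- def convertToBase7(num: int):
--     if num < 0:
--         return '-' + _base7(-num)
--     return _base7(num)
--
-- def _base7(n: int) -> str: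
--     if n < 7:
--         return str(n)
--     return _base7(n // 7) + str(n % 7)
-- ===== Notes on version B (the rewrite author's own statement) =====
-- stated objective: simpler
-- what changed: Replaces the list-accumulate-then-reverse-and-join loop by a direct recursion that builds the string most-significant digit first via the call stack, with the sign handled once at the top.
import Mathlib
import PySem

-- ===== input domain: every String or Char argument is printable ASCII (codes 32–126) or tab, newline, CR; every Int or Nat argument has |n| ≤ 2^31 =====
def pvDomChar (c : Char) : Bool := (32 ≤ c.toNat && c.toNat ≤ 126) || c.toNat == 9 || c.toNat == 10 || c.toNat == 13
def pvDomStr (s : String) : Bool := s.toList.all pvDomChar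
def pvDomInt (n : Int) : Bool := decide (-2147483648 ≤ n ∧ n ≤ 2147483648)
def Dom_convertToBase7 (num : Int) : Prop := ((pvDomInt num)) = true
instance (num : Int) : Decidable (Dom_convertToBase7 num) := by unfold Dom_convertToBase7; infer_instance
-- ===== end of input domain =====

-- B replaces A's append-digits-then-reverse-and-join loop by a direct recursion that emits the
-- most-significant digit first via the call stack (objective: simpler).

-- ===== PORT A =====
-- the 'while num >= 7' loop: returns (base7 list so far, final num)
def pvLoopA (num : Int) (base7 : List String) : List String × Int :=
  if 7 ≤ num then
    pvLoopA (PySem.Int.floordiv num 7) (base7 ++ [PySem.Int.toStr (PySem.Int.mod num 7)])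
  else (base7, num)
termination_by num.toNat
decreasing_by
  rename_i h
  rw [PySem.Int.floordiv_eq_ediv_of_pos (by norm_num)]
  omega

def convertToBase7 (num : Int) : String :=
  let flag : Int := if num < 0 then 1 else 0
  let num1 : Int := if num < 0 then -num else num
  let r := pvLoopA num1 []
  let base7 := r.1 ++ [PySem.Int.toStr r.2]
  let base7 := if flag ≠ 0 then base7 ++ ["-"] else base7
  PySem.Str.join "" base7.reverse

-- ===== PORT B =====
-- recursive helper _base7: base case n < 7, else helper(n//7) + str(n%7)
def pvBase7Rec (n : Int) : String :=
  if n < 7 then PySem.Int.toStr n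
  else pvBase7Rec (PySem.Int.floordiv n 7) ++ PySem.Int.toStr (PySem.Int.mod n 7)
termination_by n.toNat
decreasing_by
  rename_i h
  rw [PySem.Int.floordiv_eq_ediv_of_pos (by norm_num)]
  omega

def convertToBase7_alt (num : Int) : String :=
  if num < 0 then "-" ++ pvBase7Rec (-num) else pvBase7Rec num

-- ===== PRECONDITION & SPEC =====
def Spec_convertToBase7 (num : Int) (out : String) : Prop := out = convertToBase7_alt num
instance (num : Int) (out : String) : Decidable (Spec_convertToBase7 num out) := by unfold Spec_convertToBase7; infer_instance

-- ===== CLAIM (what is proved, stated in full; the proofs are below) =====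
def Claim_equal_convertToBase7 : Prop := ∀ (num : Int), Dom_convertToBase7 num → Spec_convertToBase7 num (convertToBase7 num)

-- ===== LEMMAS AND PROOFS =====

-- ''.join with empty separator is character-list flatten
lemma pv_chars_join_nil (ls : List (List Char)) : PySem.Chars.join [] ls = ls.flatten := by
  induction ls with
  | nil => simp [pysem]
  | cons x xs ih =>
    cases xs with
    | nil => simp [pysem]
    | cons y ys =>
      rw [PySem.Chars.join_cons_cons]
      simp [ih]

-- loop invariant: joining A's accumulated digits (reversed) is B's recursion output
lemma pv_key (n : Int) (hn : 0 ≤ n) (acc : List String) :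
    ((((pvLoopA n acc).1 ++ [PySem.Int.toStr (pvLoopA n acc).2]).reverse).map String.toList).flatten
    = (pvBase7Rec n).toList ++ ((acc.reverse).map String.toList).flatten := by
  rw [pvLoopA]
  by_cases h : 7 ≤ n
  · rw [if_pos h]
    have hq : 0 ≤ PySem.Int.floordiv n 7 := by
      rw [PySem.Int.floordiv_eq_ediv_of_pos (by norm_num)]; omega
    have IH := pv_key (PySem.Int.floordiv n 7) hq
      (acc ++ [PySem.Int.toStr (PySem.Int.mod n 7)])
    rw [IH]
    conv_rhs => rw [pvBase7Rec]
    rw [if_neg (by omega : ¬ n < 7)]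
    simp [PySem.Int.toList_toStr]
  · rw [if_neg h]
    rw [pvBase7Rec, if_pos (by omega : n < 7)]
    simp
termination_by n.toNat
decreasing_by
  rw [PySem.Int.floordiv_eq_ediv_of_pos (by norm_num)]
  omega

-- ===== VERDICT (by name: the statement is the Claim_ definition above) =====
theorem convertToBase7_spec : Claim_equal_convertToBase7 := by
  intro num _
  unfold Spec_convertToBase7 convertToBase7 convertToBase7_alt
  apply String.toList_inj.mp
  by_cases h : num < 0
  · simp only [if_pos h]
    have hk := pv_key (-num) (by omega) []
    simp at hk
    simp [List.reverse_append, pv_chars_join_nil, hk]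
  · simp only [if_neg h]
    have hk := pv_key num (by omega) []
    simp at hk
    simp [List.reverse_append, pv_chars_join_nil, hk]
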